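-- pv_equiv track=rewrite | github.com/GreenWaves-Technologies/gap_sdk | tools/pulp_tools/pulp-debug-bridge/python/bridge/chips/gap_rev1.py | extract_binary
-- ===== SOURCE A (Python) =====
-- import math
--
-- def extract_binary(buffer, bstart, blen):
--     sbuffer = []
--     idx = int(math.floor(bstart / 8))
--     bend = int(bstart) + int(blen)
--     while idx * 8 < bend:
--         rest = bend - idx * 8
--         b = ord(buffer[idx])
--         if rest < 8:
--             sbuffer.append("{0:0{1}b}".format(b>>(8-rest), rest))
--         else:
--             sbuffer.append("{:08b}".format(b))
--         idx = idx + 1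
--     return "".join(sbuffer)
-- ===== SOURCE B (Python) =====
-- import math
--
-- def extract_binary(buffer, bstart, blen):
--     idx = int(math.floor(bstart / 8))
--     nbits = int(bstart) + int(blen) - 8 * idx
--     if nbits <= 0:
--         return ""
--     nbytes = -(-nbits // 8)
--     val = 0
--     for i in range(idx, idx + nbytes):
--         val = val * 256 + ord(buffer[i])
--     return format(val >> (8 * nbytes - nbits), '0{}b'.format(nbits))
-- ===== Notes on version B (the rewrite author's own statement) =====
-- stated objective: alternative
-- what changed: B replaces A's loop that appends a per-byte binary-string chunk (with an in-loop branch truncating the last byte) and joins them, by accumulating all accessed bytes into one big integer and producing the whole result with a single shift and one zero-padded binary format.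
import Mathlib
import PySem

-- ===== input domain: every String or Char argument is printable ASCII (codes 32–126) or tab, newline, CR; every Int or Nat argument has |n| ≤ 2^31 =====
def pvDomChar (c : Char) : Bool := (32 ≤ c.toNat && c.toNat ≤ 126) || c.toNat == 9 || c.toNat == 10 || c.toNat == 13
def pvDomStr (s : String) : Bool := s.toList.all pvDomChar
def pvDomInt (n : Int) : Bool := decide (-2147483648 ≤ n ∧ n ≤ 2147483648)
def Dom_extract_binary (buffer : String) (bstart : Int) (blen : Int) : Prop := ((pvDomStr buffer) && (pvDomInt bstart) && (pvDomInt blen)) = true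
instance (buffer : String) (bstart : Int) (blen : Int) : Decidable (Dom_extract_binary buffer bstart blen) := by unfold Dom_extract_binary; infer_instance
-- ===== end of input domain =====

-- B replaces A's per-byte binary-string chunks (branch in the loop + join) by one integer
-- accumulator and a single shift-and-format; same return value, similar cost (objective: alternative).

-- ord(buffer[i]) with Python index semantics; 0 is a dummy for the out-of-range case,
-- which Pre_ excludes (Python raises IndexError there). Shared byte accessor of both ports.
def ordAt (buffer : String) (i : Int) : Nat :=
  match PySem.Str.pyGet? buffer i with
  | some c => c.toNat
  | none => 0

-- binary digits of n, least significant first ([] for 0)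
def bitsRev : Nat → List Char
  | 0 => []
  | n+1 => (if (n+1) % 2 = 1 then '1' else '0') :: bitsRev ((n+1)/2)
decreasing_by exact Nat.div_lt_self (Nat.succ_pos n) (by omega)

-- format(n, 'b') for n ≥ 0
def binStr (n : Nat) : List Char := if n = 0 then ['0'] else (bitsRev n).reverse

-- format(n, '0{w}b') for n ≥ 0 (zero-pad on the left to at least width w), as List Char
def padBin (n w : Nat) : List Char :=
  List.replicate (w - (binStr n).length) '0' ++ binStr n

-- faithful port of Python's format(n, '0{}b'.format(w)) for n ≥ 0
def pyFormatBin (n w : Nat) : String := String.ofList (padBin n w)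

-- ===== PORT A =====
def extract_binary_loop (buffer : String) (bend : Int) (idx : Int) : List String :=
  if idx * 8 < bend then
    let rest := bend - idx * 8
    let b := ordAt buffer idx
    (if rest < 8 then pyFormatBin (b >>> (8 - rest).toNat) rest.toNat
     else pyFormatBin b 8) :: extract_binary_loop buffer bend (idx + 1)
  else []
termination_by (bend - idx * 8).toNat
decreasing_by omega

def extract_binary (buffer : String) (bstart : Int) (blen : Int) : String :=
  let idx := PySem.Int.floordiv bstart 8
  let bend := bstart + blen
  PySem.Str.join "" (extract_binary_loop buffer bend idx)

-- ===== PORT B =====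
def extract_binary_alt (buffer : String) (bstart : Int) (blen : Int) : String :=
  let idx := PySem.Int.floordiv bstart 8
  let nbits := bstart + blen - 8 * idx
  if nbits ≤ 0 then ""
  else
    let nbytes := -(PySem.Int.floordiv (-nbits) 8)
    let val := (PySem.List.pyRange idx (idx + nbytes) 1).foldl
      (fun v i => v * 256 + ordAt buffer i) 0
    pyFormatBin (val >>> (8 * nbytes - nbits).toNat) nbits.toNat

-- ===== PRECONDITION & SPEC =====
-- Pre_ excludes exactly the inputs where A (and B) raise IndexError: some byte index of the
-- accessed range [bstart//8, ceil((bstart+blen)/8)) falls outside [-len(buffer), len(buffer)).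
def Pre_extract_binary (buffer : String) (bstart : Int) (blen : Int) : Prop :=
  bstart + blen ≤ 8 * PySem.Int.floordiv bstart 8 ∨
  (-(PySem.Str.len buffer) ≤ PySem.Int.floordiv bstart 8 ∧
    bstart + blen ≤ 8 * PySem.Str.len buffer)
instance (buffer : String) (bstart : Int) (blen : Int) : Decidable (Pre_extract_binary buffer bstart blen) := by unfold Pre_extract_binary; infer_instance

def pvWitness_extract_binary : String × Int × Int := ("AB", 0, 12)

def Spec_extract_binary (buffer : String) (bstart : Int) (blen : Int) (out : String) : Prop := out = extract_binary_alt buffer bstart blen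
instance (buffer : String) (bstart : Int) (blen : Int) (out : String) : Decidable (Spec_extract_binary buffer bstart blen out) := by unfold Spec_extract_binary; infer_instance

-- ===== CLAIM (what is proved, stated in full; the proofs are below) =====
def Claim_equal_extract_binary : Prop := ∀ (buffer : String) (bstart : Int) (blen : Int), Dom_extract_binary buffer bstart blen → Pre_extract_binary buffer bstart blen → Spec_extract_binary buffer bstart blen (extract_binary buffer bstart blen)

-- ===== LEMMAS AND PROOFS =====

-- the fold of port B, with explicit byte count k
def byteVal (buffer : String) (idx : Int) (k : Nat) : Nat :=
  (PySem.List.pyRange idx (idx + (k : Int)) 1).foldl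
    (fun v i => v * 256 + ordAt buffer i) 0

lemma ordAt_lt (buffer : String) (hD : ∀ c ∈ buffer.toList, c.toNat < 256) (i : Int) :
    ordAt buffer i < 256 := by
  unfold ordAt
  cases h : PySem.Str.pyGet? buffer i with
  | none => simp
  | some c =>
      simpa using hD c (PySem.List.mem_of_pyGet?_eq_some buffer.toList h)

lemma bitsRev_len_le (w : Nat) : ∀ n, n < 2 ^ w → (bitsRev n).length ≤ w := by
  induction w with
  | zero =>
      intro n h
      have : n = 0 := by omega
      subst this; simp [bitsRev]
  | succ w IH =>
      intro n h
      cases n with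
      | zero => simp [bitsRev]
      | succ m =>
          rw [bitsRev]
          simp only [List.length_cons]
          have hp : 2 ^ (w + 1) = 2 * 2 ^ w := by ring
          have := IH ((m + 1) / 2) (by omega)
          omega

lemma bitsRev_pos (t : Nat) (ht : 0 < t) :
    bitsRev t = (if t % 2 = 1 then '1' else '0') :: bitsRev (t / 2) := by
  cases t with
  | zero => omega
  | succ m => conv_lhs => rw [bitsRev]

lemma bitsRev_split (a : Nat) (ha : 0 < a) :
    ∀ w t, t < 2 ^ w →
      bitsRev (a * 2 ^ w + t) =
        (bitsRev t ++ List.replicate (w - (bitsRev t).length) '0') ++ bitsRev a := by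
  intro w
  induction w with
  | zero =>
      intro t ht
      have : t = 0 := by omega
      subst this; simp [bitsRev]
  | succ w IH =>
      intro t ht
      have hp : 2 ^ (w + 1) = 2 * 2 ^ w := by ring
      have hq : 0 < 2 ^ w := Nat.two_pow_pos w
      have hN : 0 < a * 2 ^ (w + 1) + t := by
        have : 0 < a * 2 ^ (w + 1) := Nat.mul_pos ha (by omega)
        omega
      rw [bitsRev_pos _ hN]
      have hmod : (a * 2 ^ (w + 1) + t) % 2 = t % 2 := by
        have h2 : a * 2 ^ (w + 1) = 2 * (a * 2 ^ w) := by rw [hp]; ring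
        omega
      have hdiv : (a * 2 ^ (w + 1) + t) / 2 = a * 2 ^ w + t / 2 := by
        have h2 : a * 2 ^ (w + 1) = 2 * (a * 2 ^ w) := by rw [hp]; ring
        omega
      rw [hmod, hdiv, IH (t / 2) (by omega)]
      by_cases ht0 : t = 0
      · subst ht0
        simp [bitsRev, List.replicate_succ]
      · rw [bitsRev_pos t (by omega)]
        have hlt := bitsRev_len_le w (t / 2) (by omega)
        simp only [List.length_cons]
        have hc : w + 1 - ((bitsRev (t / 2)).length + 1) = w - (bitsRev (t / 2)).length := by omega
        rw [hc]
        simp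

lemma binStr_len_le (n w : Nat) (hw : 0 < w) (hn : n < 2 ^ w) : (binStr n).length ≤ w := by
  unfold binStr
  split
  · simpa using hw
  · simpa using bitsRev_len_le w n hn

lemma padBin_split (a t v w : Nat) (ht : t < 2 ^ w) (hw : 0 < w) (hv : 0 < v) :
    padBin (a * 2 ^ w + t) (v + w) = padBin a v ++ padBin t w := by
  have hlen : (binStr t).length ≤ w := binStr_len_le t w hw ht
  rcases Nat.eq_zero_or_pos a with ha | ha
  · subst ha
    simp only [Nat.zero_mul, Nat.zero_add]
    unfold padBin
    rw [show binStr 0 = ['0'] from rfl]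
    have h1 : v + w - (binStr t).length = (v - 1) + (1 + (w - (binStr t).length)) := by omega
    rw [h1, List.replicate_add, List.replicate_add]
    simp
  · have hq : 0 < 2 ^ w := Nat.two_pow_pos w
    have hN : a * 2 ^ w + t ≠ 0 := by
      have : 0 < a * 2 ^ w := Nat.mul_pos ha hq
      omega
    have hb := bitsRev_split a ha w t ht
    have hla : 1 ≤ (bitsRev a).length := by
      cases a with
      | zero => omega
      | succ m => rw [bitsRev]; simp
    have hlt : (bitsRev t).length ≤ w := bitsRev_len_le w t ht
    unfold padBin binStr
    rw [if_neg hN, if_neg (by omega : ¬ a = 0), hb]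
    by_cases ht0 : t = 0
    · subst ht0
      simp only [bitsRev, List.nil_append, List.reverse_append,
        List.reverse_replicate, List.reverse_nil, List.length_append,
        List.length_reverse, List.length_replicate, List.length_nil]
      have h1 : v + w - ((bitsRev a).length + (w - 0)) = v - (bitsRev a).length := by omega
      rw [h1]
      simp only [if_true, List.length_cons, List.length_nil, Nat.sub_zero]
      rw [show ['0'] = List.replicate 1 '0' from rfl, ← List.replicate_add,
        show w - 1 + 1 = w by omega]
      simp [List.append_assoc]
    · rw [if_neg ht0]
      simp only [List.reverse_append, List.reverse_replicate, List.length_append,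
        List.length_reverse, List.length_replicate]
      have h1 : v + w - ((bitsRev a).length + (w - (bitsRev t).length + (bitsRev t).length))
          = v - (bitsRev a).length := by omega
      rw [h1]
      simp [List.append_assoc]

lemma byteVal_init (buffer : String) :
    ∀ (k : Nat) (idx : Int) (v : Nat),
      (PySem.List.pyRange idx (idx + (k : Int)) 1).foldl
        (fun v i => v * 256 + ordAt buffer i) v = v * 256 ^ k + byteVal buffer idx k := by
  intro k
  induction k with
  | zero =>
      intro idx v
      rw [PySem.List.pyRange_one_eq_nil (by simp)]
      simp [byteVal, PySem.List.pyRange_one_eq_nil]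
  | succ k IH =>
      intro idx v
      have hcons : PySem.List.pyRange idx (idx + ((k + 1 : Nat) : Int)) 1
          = idx :: PySem.List.pyRange (idx + 1) ((idx + 1) + (k : Int)) 1 := by
        rw [show idx + ((k + 1 : Nat) : Int) = (idx + 1) + (k : Int) by push_cast; ring,
          PySem.List.pyRange_one_cons (by omega)]
      rw [byteVal, hcons]
      simp only [List.foldl_cons]
      rw [IH (idx + 1) (v * 256 + ordAt buffer idx), IH (idx + 1) (0 * 256 + ordAt buffer idx)]
      unfold byteVal
      ring

lemma byteVal_lt (buffer : String) (hD : ∀ c ∈ buffer.toList, c.toNat < 256) :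
    ∀ (k : Nat) (idx : Int), byteVal buffer idx k < 256 ^ k := by
  intro k
  induction k with
  | zero =>
      intro idx
      rw [byteVal, PySem.List.pyRange_one_eq_nil (by simp)]
      simp
  | succ k IH =>
      intro idx
      have hcons : PySem.List.pyRange idx (idx + ((k + 1 : Nat) : Int)) 1
          = idx :: PySem.List.pyRange (idx + 1) ((idx + 1) + (k : Int)) 1 := by
        rw [show idx + ((k + 1 : Nat) : Int) = (idx + 1) + (k : Int) by push_cast; ring,
          PySem.List.pyRange_one_cons (by omega)]
      rw [byteVal, hcons]
      simp only [List.foldl_cons]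
      rw [byteVal_init buffer k (idx + 1) (0 * 256 + ordAt buffer idx)]
      have hb := ordAt_lt buffer hD idx
      have hV := IH (idx + 1)
      have h1 : (0 * 256 + ordAt buffer idx) * 256 ^ k ≤ 255 * 256 ^ k :=
        Nat.mul_le_mul_right _ (by omega)
      have h2 : (256 : Nat) ^ (k + 1) = 256 * 256 ^ k := by ring
      omega

lemma byteVal_cons (buffer : String) (k : Nat) (hk : 0 < k) (idx : Int) :
    byteVal buffer idx k = ordAt buffer idx * 256 ^ (k - 1) + byteVal buffer (idx + 1) (k - 1) := by
  have hcons : PySem.List.pyRange idx (idx + (k : Int)) 1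
      = idx :: PySem.List.pyRange (idx + 1) ((idx + 1) + ((k - 1 : Nat) : Int)) 1 := by
    rw [show idx + (k : Int) = (idx + 1) + ((k - 1 : Nat) : Int) by omega,
      PySem.List.pyRange_one_cons (by omega)]
  rw [byteVal, hcons]
  simp only [List.foldl_cons]
  rw [byteVal_init buffer (k - 1) (idx + 1) (0 * 256 + ordAt buffer idx)]
  ring

lemma loop_eq (buffer : String) (hD : ∀ c ∈ buffer.toList, c.toNat < 256) :
    ∀ (n : Nat) (idx : Int), 0 < n →
      ((extract_binary_loop buffer (8 * idx + n) idx).map String.toList).flatten =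
        padBin (byteVal buffer idx ((n + 7) / 8) >>> (8 * ((n + 7) / 8) - n)) n := by
  intro n
  induction n using Nat.strong_induction_on with
  | _ n IH =>
    intro idx hn
    rw [extract_binary_loop.eq_def]
    rw [if_pos (by omega : idx * 8 < 8 * idx + (n : Int))]
    simp only []
    have hrest : 8 * idx + (n : Int) - idx * 8 = (n : Int) := by ring
    rw [hrest]
    by_cases h8 : n ≤ 8
    · -- single (last) byte
      have hk : (n + 7) / 8 = 1 := by omega
      have hV : byteVal buffer idx 1 = ordAt buffer idx := by
        rw [byteVal_cons buffer 1 (by omega) idx, byteVal,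
          PySem.List.pyRange_one_eq_nil (by simp)]
        simp
      have htail : extract_binary_loop buffer (8 * idx + (n : Int)) (idx + 1) = [] := by
        rw [extract_binary_loop.eq_def, if_neg (by omega)]
      rw [htail, hk, hV]
      by_cases hlt : n < 8
      · rw [if_pos (by exact_mod_cast hlt : ((n : Int) < 8))]
        simp only [List.map_cons, List.map_nil, List.flatten_cons, List.flatten_nil,
          List.append_nil, pyFormatBin, String.toList_ofList]
        rw [show ((8 : Int) - (n : Int)).toNat = 8 - n by omega,
          show ((n : Int)).toNat = n by omega,
          show 8 * 1 - n = 8 - n by omega]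
      · have hn8 : n = 8 := by omega
        subst hn8
        rw [if_neg (by omega : ¬ (((8 : Nat) : Int) < 8))]
        simp only [List.map_cons, List.map_nil, List.flatten_cons, List.flatten_nil,
          List.append_nil, pyFormatBin, String.toList_ofList]
        rw [show 8 * 1 - 8 = 0 by omega, Nat.shiftRight_zero]
    · -- a full byte then the rest
      have hk2 : 2 ≤ (n + 7) / 8 := by omega
      set k := (n + 7) / 8 with hkdef
      have hk' : (n - 8 + 7) / 8 = k - 1 := by omega
      rw [if_neg (by omega : ¬ ((n : Int) < 8))]
      have hbend : 8 * idx + (n : Int) = 8 * (idx + 1) + ((n - 8 : Nat) : Int) := by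
        push_cast [Nat.cast_sub (by omega : 8 ≤ n)]; ring
      rw [hbend]
      simp only [List.map_cons, List.flatten_cons, pyFormatBin, String.toList_ofList]
      rw [IH (n - 8) (by omega) (idx + 1) (by omega), hk']
      -- arithmetic: split the value and the shift
      set b := ordAt buffer idx with hbdef
      set V := byteVal buffer (idx + 1) (k - 1) with hVdef
      have hblt : b < 256 := ordAt_lt buffer hD idx
      have hVlt : V < 256 ^ (k - 1) := byteVal_lt buffer hD (k - 1) (idx + 1)
      have hs : 8 * (k - 1) - (n - 8) = 8 * k - n := by omega
      set s := 8 * k - n with hsdef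
      have hsle : s ≤ 8 * (k - 1) := by omega
      have hpow : (256 : Nat) ^ (k - 1) = 2 ^ (8 * (k - 1)) := by
        rw [show (256 : Nat) = 2 ^ 8 by norm_num, ← pow_mul]
      have hsplit8 : 8 * (k - 1) = (n - 8) + s := by omega
      have hshift : byteVal buffer idx k >>> s = b * 2 ^ (n - 8) + V >>> s := by
        rw [byteVal_cons buffer k (by omega) idx, ← hbdef, ← hVdef]
        rw [Nat.shiftRight_eq_div_pow, Nat.shiftRight_eq_div_pow]
        rw [hpow, hsplit8, pow_add]
        rw [show b * (2 ^ (n - 8) * 2 ^ s) + V = V + (b * 2 ^ (n - 8)) * 2 ^ s by ring]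
        rw [Nat.add_mul_div_right _ _ (Nat.two_pow_pos s)]
        ring
      have htlt : V >>> s < 2 ^ (n - 8) := by
        rw [Nat.shiftRight_eq_div_pow]
        rw [Nat.div_lt_iff_lt_mul (Nat.two_pow_pos s)]
        calc V < 256 ^ (k - 1) := hVlt
          _ = 2 ^ ((n - 8) + s) := by rw [hpow, hsplit8]
          _ = 2 ^ (n - 8) * 2 ^ s := pow_add 2 _ _
      rw [hs, hshift]
      rw [show n = 8 + (n - 8) by omega]
      rw [show 8 + (n - 8) - 8 = n - 8 by omega]
      rw [padBin_split b (V >>> s) 8 (n - 8) htlt (by omega) (by omega)]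

lemma charsJoinE : ∀ L : List (List Char), PySem.Chars.join [] L = L.flatten
  | [] => by rw [PySem.Chars.join_nil]; rfl
  | [p] => by rw [PySem.Chars.join_singleton]; simp
  | p :: q :: r => by
      rw [PySem.Chars.join_cons_cons, charsJoinE (q :: r)]
      simp

lemma joinE (l : List String) :
    PySem.Str.join "" l = String.ofList ((l.map String.toList).flatten) := by
  rw [PySem.Str.join, show ("" : String).toList = [] from rfl, charsJoinE]

theorem extract_binary_spec_aux (buffer : String) (bstart blen : Int)
    (hD : Dom_extract_binary buffer bstart blen) :
    extract_binary buffer bstart blen = extract_binary_alt buffer bstart blen := by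
  have hD' : ∀ c ∈ buffer.toList, c.toNat < 256 := by
    intro c hc
    unfold Dom_extract_binary pvDomStr at hD
    simp only [Bool.and_eq_true, List.all_eq_true] at hD
    have := hD.1.1 c hc
    unfold pvDomChar at this
    simp only [Bool.or_eq_true, Bool.and_eq_true, decide_eq_true_eq, beq_iff_eq] at this
    omega
  unfold extract_binary extract_binary_alt
  simp only []
  by_cases hle : bstart + blen - 8 * PySem.Int.floordiv bstart 8 ≤ 0
  · rw [if_pos hle]
    rw [show extract_binary_loop buffer (bstart + blen) (PySem.Int.floordiv bstart 8) = []
        by rw [extract_binary_loop.eq_def, if_neg (by omega)]]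
    rw [joinE]
    rfl
  · rw [if_neg hle]
    set i0 := PySem.Int.floordiv bstart 8 with hi0
    set n := (bstart + blen - 8 * i0).toNat with hn
    have hnpos : 0 < n := by omega
    have hbend : bstart + blen = 8 * i0 + (n : Int) := by omega
    rw [joinE, hbend, loop_eq buffer hD' n i0 hnpos]
    rw [show 8 * i0 + (n : Int) - 8 * i0 = (n : Int) by ring]
    have hq : -(PySem.Int.floordiv (-(n : Int)) 8) = (((n + 7) / 8 : Nat) : Int) := by
      rw [PySem.Int.neg_floordiv_neg_eq_iff_of_pos (by omega : (0 : Int) < 8)]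
      constructor <;> omega
    rw [hq]
    unfold pyFormatBin byteVal
    rw [show (8 * (((n + 7) / 8 : Nat) : Int) - (n : Int)).toNat = 8 * ((n + 7) / 8) - n by omega]

-- ===== VERDICT (by name: the statement is the Claim_ definition above) =====
theorem extract_binary_spec : Claim_equal_extract_binary := by
  intro buffer bstart blen hD _hPre
  exact extract_binary_spec_aux buffer bstart blen hD
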